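-- pv_equiv track=rewrite | github.com/brightseth/vibe | achievement_badge_engine.py | check_streak_badges
-- ===== SOURCE A (Python) =====
-- from typing import Dict, List, Optional, Any
--
-- def check_streak_badges(handle: str, current_streak: int, best_streak: int) -> List[str]:
--     """Check which streak badges a user qualifies for"""
--     earned_badges = []
--
--     # Check each streak milestone
--     streak_milestones = [
--         (1, "first_day"),
--         (3, "early_bird"),
--         (7, "week_warrior"),
--         (14, "consistency_champion"),
--         (30, "monthly_legend"),
--         (100, "century_club")
--     ]
--
--     for threshold, badge_id in streak_milestones:
--         if current_streak >= threshold: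
--             earned_badges.append(badge_id)
--
--     return earned_badges
-- ===== SOURCE B (Python) =====
-- from bisect import bisect_right
--
-- _THRESHOLDS = [1, 3, 7, 14, 30, 100]
-- _BADGE_IDS = ["first_day", "early_bird", "week_warrior",
--               "consistency_champion", "monthly_legend", "century_club"]
--
-- def check_streak_badges(handle: str, current_streak: int, best_streak: int):
--     """Check which streak badges a user qualifies for"""
--     count = bisect_right(_THRESHOLDS, current_streak)
--     return _BADGE_IDS[:count]
-- ===== Notes on version B (the rewrite author's own statement) =====
-- stated objective: idiomatic
-- what changed: Replaces the per-milestone scan-and-append with bisect_right on the sorted thresholds followed by a prefix slice of the parallel badge-id list, exploiting that the earned set is always a prefix.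
import Mathlib
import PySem

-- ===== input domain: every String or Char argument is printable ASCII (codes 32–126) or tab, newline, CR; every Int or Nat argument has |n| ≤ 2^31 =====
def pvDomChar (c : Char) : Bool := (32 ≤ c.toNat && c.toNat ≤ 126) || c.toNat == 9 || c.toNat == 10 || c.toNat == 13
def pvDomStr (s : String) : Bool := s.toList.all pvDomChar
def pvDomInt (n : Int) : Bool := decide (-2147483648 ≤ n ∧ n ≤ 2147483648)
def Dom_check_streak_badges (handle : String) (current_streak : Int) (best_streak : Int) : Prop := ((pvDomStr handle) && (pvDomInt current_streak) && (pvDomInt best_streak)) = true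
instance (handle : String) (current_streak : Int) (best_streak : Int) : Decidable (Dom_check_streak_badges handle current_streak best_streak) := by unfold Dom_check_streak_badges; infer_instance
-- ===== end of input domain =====

-- B replaces the per-milestone scan with bisect_right on the sorted thresholds plus a prefix slice (idiomatic; same cost on 6 milestones).


-- ===== PORT A =====
def check_streak_badges (handle : String) (current_streak : Int) (best_streak : Int) : List String :=
  let streak_milestones : List (Int × String) :=
    [(1, "first_day"), (3, "early_bird"), (7, "week_warrior"),
     (14, "consistency_champion"), (30, "monthly_legend"), (100, "century_club")]
  streak_milestones.foldl
    (fun earned_badges tb =>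
      if current_streak ≥ tb.1 then earned_badges ++ [tb.2] else earned_badges)
    []

-- ===== PORT B =====
-- transliteration of bisect.bisect_right's binary search (lo/hi loop as recursion on hi - lo)
def pvBisectRight (a : List Int) (x : Int) (lo hi : Nat) : Nat :=
  if h : lo < hi then
    let mid := (lo + hi) / 2
    if x < a.getD mid 0 then pvBisectRight a x lo mid
    else pvBisectRight a x (mid + 1) hi
  else lo
termination_by hi - lo
decreasing_by all_goals omega

def pvThresholds : List Int := [1, 3, 7, 14, 30, 100]
def pvBadgeIds : List String :=
  ["first_day", "early_bird", "week_warrior", "consistency_champion", "monthly_legend", "century_club"]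

def check_streak_badges_alt (handle : String) (current_streak : Int) (best_streak : Int) : List String :=
  let count := pvBisectRight pvThresholds current_streak 0 pvThresholds.length
  pvBadgeIds.take count

-- ===== PRECONDITION & SPEC =====
def Spec_check_streak_badges (handle : String) (current_streak : Int) (best_streak : Int) (out : List String) : Prop := out = check_streak_badges_alt handle current_streak best_streak
instance (handle : String) (current_streak : Int) (best_streak : Int) (out : List String) : Decidable (Spec_check_streak_badges handle current_streak best_streak out) := by unfold Spec_check_streak_badges; infer_instance

-- ===== CLAIM (what is proved, stated in full; the proofs are below) =====
def Claim_equal_check_streak_badges : Prop := ∀ (handle : String) (current_streak : Int) (best_streak : Int), Dom_check_streak_badges handle current_streak best_streak → Spec_check_streak_badges handle current_streak best_streak (check_streak_badges handle current_streak best_streak)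


-- ===== LEMMAS AND PROOFS =====
lemma pvBisectRight_end (a : List Int) (x : Int) (lo : Nat) : pvBisectRight a x lo lo = lo := by
  rw [pvBisectRight]; simp

lemma pvBisect_chain (c : Int) :
    pvBisectRight pvThresholds c 0 pvThresholds.length =
      if c < 1 then 0 else if c < 3 then 1 else if c < 7 then 2 else
      if c < 14 then 3 else if c < 30 then 4 else if c < 100 then 5 else 6 := by
  have h0 : pvThresholds.length = 6 := by decide
  rw [h0]
  unfold pvThresholds
  split_ifs with h1 h2 h3 h4 h5 h6
  · rw [pvBisectRight]; norm_num [List.getD]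
    rw [if_pos (show c < 14 by omega), pvBisectRight]; norm_num [List.getD]
    rw [if_pos (show c < 3 by omega), pvBisectRight]; norm_num [List.getD]
    rw [if_pos h1, pvBisectRight_end]
  · rw [pvBisectRight]; norm_num [List.getD]
    rw [if_pos (show c < 14 by omega), pvBisectRight]; norm_num [List.getD]
    rw [if_pos h2, pvBisectRight]; norm_num [List.getD]
    rw [if_neg h1, pvBisectRight_end]
  · rw [pvBisectRight]; norm_num [List.getD]
    rw [if_pos (show c < 14 by omega), pvBisectRight]; norm_num [List.getD]
    rw [if_neg h2, pvBisectRight]; norm_num [List.getD]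
    rw [if_pos h3, pvBisectRight_end]
  · rw [pvBisectRight]; norm_num [List.getD]
    rw [if_pos h4, pvBisectRight]; norm_num [List.getD]
    rw [if_neg h2, pvBisectRight]; norm_num [List.getD]
    rw [if_neg h3, pvBisectRight_end]
  · rw [pvBisectRight]; norm_num [List.getD]
    rw [if_neg h4, pvBisectRight]; norm_num [List.getD]
    rw [if_pos (show c < 100 by omega), pvBisectRight]; norm_num [List.getD]
    rw [if_pos h5, pvBisectRight_end]
  · rw [pvBisectRight]; norm_num [List.getD]
    rw [if_neg h4, pvBisectRight]; norm_num [List.getD]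
    rw [if_pos h6, pvBisectRight]; norm_num [List.getD]
    rw [if_neg h5, pvBisectRight_end]
  · rw [pvBisectRight]; norm_num [List.getD]
    rw [if_neg h4, pvBisectRight]; norm_num [List.getD]
    rw [if_neg h6, pvBisectRight_end]

-- ===== VERDICT (by name: the statement is the Claim_ definition above) =====
theorem check_streak_badges_spec : Claim_equal_check_streak_badges := by
  intro handle c b _
  unfold Spec_check_streak_badges check_streak_badges check_streak_badges_alt
  rw [pvBisect_chain]
  simp only [List.foldl, pvBadgeIds, ge_iff_le]
  by_cases h1 : c < (1:Int)
  · rw [if_neg (show ¬ (1:Int) ≤ c by omega), if_neg (show ¬ (3:Int) ≤ c by omega), if_neg (show ¬ (7:Int) ≤ c by omega), if_neg (show ¬ (14:Int) ≤ c by omega), if_neg (show ¬ (30:Int) ≤ c by omega), if_neg (show ¬ (100:Int) ≤ c by omega), if_pos (show c < (1:Int) by omega)]; rfl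
  by_cases h2 : c < (3:Int)
  · rw [if_pos (show (1:Int) ≤ c by omega), if_neg (show ¬ (3:Int) ≤ c by omega), if_neg (show ¬ (7:Int) ≤ c by omega), if_neg (show ¬ (14:Int) ≤ c by omega), if_neg (show ¬ (30:Int) ≤ c by omega), if_neg (show ¬ (100:Int) ≤ c by omega), if_neg (show ¬ c < (1:Int) by omega), if_pos (show c < (3:Int) by omega)]; rfl
  by_cases h3 : c < (7:Int)
  · rw [if_pos (show (1:Int) ≤ c by omega), if_pos (show (3:Int) ≤ c by omega), if_neg (show ¬ (7:Int) ≤ c by omega), if_neg (show ¬ (14:Int) ≤ c by omega), if_neg (show ¬ (30:Int) ≤ c by omega), if_neg (show ¬ (100:Int) ≤ c by omega), if_neg (show ¬ c < (1:Int) by omega), if_neg (show ¬ c < (3:Int) by omega), if_pos (show c < (7:Int) by omega)]; rfl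
  by_cases h4 : c < (14:Int)
  · rw [if_pos (show (1:Int) ≤ c by omega), if_pos (show (3:Int) ≤ c by omega), if_pos (show (7:Int) ≤ c by omega), if_neg (show ¬ (14:Int) ≤ c by omega), if_neg (show ¬ (30:Int) ≤ c by omega), if_neg (show ¬ (100:Int) ≤ c by omega), if_neg (show ¬ c < (1:Int) by omega), if_neg (show ¬ c < (3:Int) by omega), if_neg (show ¬ c < (7:Int) by omega), if_pos (show c < (14:Int) by omega)]; rfl
  by_cases h5 : c < (30:Int)
  · rw [if_pos (show (1:Int) ≤ c by omega), if_pos (show (3:Int) ≤ c by omega), if_pos (show (7:Int) ≤ c by omega), if_pos (show (14:Int) ≤ c by omega), if_neg (show ¬ (30:Int) ≤ c by omega), if_neg (show ¬ (100:Int) ≤ c by omega), if_neg (show ¬ c < (1:Int) by omega), if_neg (show ¬ c < (3:Int) by omega), if_neg (show ¬ c < (7:Int) by omega), if_neg (show ¬ c < (14:Int) by omega), if_pos (show c < (30:Int) by omega)]; rfl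
  by_cases h6 : c < (100:Int)
  · rw [if_pos (show (1:Int) ≤ c by omega), if_pos (show (3:Int) ≤ c by omega), if_pos (show (7:Int) ≤ c by omega), if_pos (show (14:Int) ≤ c by omega), if_pos (show (30:Int) ≤ c by omega), if_neg (show ¬ (100:Int) ≤ c by omega), if_neg (show ¬ c < (1:Int) by omega), if_neg (show ¬ c < (3:Int) by omega), if_neg (show ¬ c < (7:Int) by omega), if_neg (show ¬ c < (14:Int) by omega), if_neg (show ¬ c < (30:Int) by omega), if_pos (show c < (100:Int) by omega)]; rfl
  rw [if_pos (show (1:Int) ≤ c by omega), if_pos (show (3:Int) ≤ c by omega), if_pos (show (7:Int) ≤ c by omega), if_pos (show (14:Int) ≤ c by omega), if_pos (show (30:Int) ≤ c by omega), if_pos (show (100:Int) ≤ c by omega), if_neg (show ¬ c < (1:Int) by omega), if_neg (show ¬ c < (3:Int) by omega), if_neg (show ¬ c < (7:Int) by omega), if_neg (show ¬ c < (14:Int) by omega), if_neg (show ¬ c < (30:Int) by omega), if_neg (show ¬ c < (100:Int) by omega)]; rfl
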